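-- pv_equiv track=rewrite | github.com/sufyan-it-is/straddly | app/routers/orders.py | _compute_slice_quantities
-- ===== SOURCE A (Python) =====
-- from typing import List, Optional
--
-- def _compute_slice_quantities(total_qty: int, max_qty_per_order: int) -> List[int]:
--     if max_qty_per_order <= 0 or total_qty <= max_qty_per_order:
--         return [total_qty]
--     slices: List[int] = []
--     remaining = int(total_qty)
--     while remaining > max_qty_per_order:
--         slices.append(max_qty_per_order)
--         remaining -= max_qty_per_order
--     if remaining > 0:
--         slices.append(remaining)
--     return slices
-- ===== SOURCE B (Python) =====
-- from typing import List
--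
-- def _compute_slice_quantities(total_qty: int, max_qty_per_order: int) -> List[int]:
--     if max_qty_per_order <= 0 or total_qty <= max_qty_per_order:
--         return [total_qty]
--     q, r = divmod(int(total_qty), max_qty_per_order)
--     return [max_qty_per_order] * q + ([r] if r > 0 else [])
-- ===== Notes on version B (the rewrite author's own statement) =====
-- stated objective: simpler
-- what changed: Replaces the repeated-subtraction loop with a single divmod closed form: q full slices of max_qty_per_order plus the positive remainder.
import Mathlib
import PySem

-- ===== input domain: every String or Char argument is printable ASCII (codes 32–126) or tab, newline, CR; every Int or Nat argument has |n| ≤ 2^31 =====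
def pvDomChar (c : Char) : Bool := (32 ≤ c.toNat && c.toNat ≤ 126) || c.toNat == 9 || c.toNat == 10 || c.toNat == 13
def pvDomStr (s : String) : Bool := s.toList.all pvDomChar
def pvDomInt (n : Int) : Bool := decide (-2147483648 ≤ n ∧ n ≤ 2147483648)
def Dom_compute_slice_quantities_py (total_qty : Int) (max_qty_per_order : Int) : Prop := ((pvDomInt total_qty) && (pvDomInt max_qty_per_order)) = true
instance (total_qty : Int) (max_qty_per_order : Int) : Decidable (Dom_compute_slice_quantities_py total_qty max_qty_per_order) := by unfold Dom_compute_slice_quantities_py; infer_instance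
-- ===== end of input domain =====

-- B replaces A's repeated-subtraction loop with a divmod closed form (q full slices plus positive remainder): simpler, loop-free arithmetic.


-- ===== PORT A =====
-- while remaining > max: append max; remaining -= max; then append remaining if > 0.
-- (The m > 0 conjunct in the dite only makes the recursion total; on the call path m > 0 always holds.)
def csqLoop (m : Int) (remaining : Int) (acc : List Int) : List Int :=
  if _h : 0 < m ∧ m < remaining then csqLoop m (remaining - m) (acc ++ [m])
  else if 0 < remaining then acc ++ [remaining] else acc
termination_by remaining.toNat
decreasing_by omega

def compute_slice_quantities_py (total_qty : Int) (max_qty_per_order : Int) : List Int :=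
  if max_qty_per_order ≤ 0 ∨ total_qty ≤ max_qty_per_order then [total_qty]
  else csqLoop max_qty_per_order total_qty []

-- ===== PORT B =====
def compute_slice_quantities_py_alt (total_qty : Int) (max_qty_per_order : Int) : List Int :=
  if max_qty_per_order ≤ 0 ∨ total_qty ≤ max_qty_per_order then [total_qty]
  else
    let q := PySem.Int.floordiv total_qty max_qty_per_order
    let r := PySem.Int.mod total_qty max_qty_per_order
    List.replicate q.toNat max_qty_per_order ++ (if 0 < r then [r] else [])

-- ===== PRECONDITION & SPEC =====
def Spec_compute_slice_quantities_py (total_qty : Int) (max_qty_per_order : Int) (out : List Int) : Prop := out = compute_slice_quantities_py_alt total_qty max_qty_per_order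
instance (total_qty : Int) (max_qty_per_order : Int) (out : List Int) : Decidable (Spec_compute_slice_quantities_py total_qty max_qty_per_order out) := by unfold Spec_compute_slice_quantities_py; infer_instance

-- ===== CLAIM (what is proved, stated in full; the proofs are below) =====
def Claim_equal_compute_slice_quantities_py : Prop := ∀ (total_qty : Int) (max_qty_per_order : Int), Dom_compute_slice_quantities_py total_qty max_qty_per_order → Spec_compute_slice_quantities_py total_qty max_qty_per_order (compute_slice_quantities_py total_qty max_qty_per_order)

-- ===== LEMMAS AND PROOFS =====

-- ===== VERDICT (by name: the statement is the Claim_ definition above) =====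
theorem csqLoop_closed (m t : Int) (acc : List Int) (hm : 0 < m) (ht : m < t) :
    csqLoop m t acc = acc ++
      (List.replicate (PySem.Int.floordiv t m).toNat m ++
        (if 0 < PySem.Int.mod t m then [PySem.Int.mod t m] else [])) := by
  rw [csqLoop, dif_pos ⟨hm, ht⟩]
  by_cases h2 : m < t - m
  · rw [csqLoop_closed m (t - m) (acc ++ [m]) hm h2]
    have hq' := (PySem.Int.floordiv_eq_iff_of_pos hm (a := t - m)
      (q := PySem.Int.floordiv (t - m) m)).mp rfl
    have hdiv : PySem.Int.floordiv t m = PySem.Int.floordiv (t - m) m + 1 := by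
      rw [PySem.Int.floordiv_eq_iff_of_pos hm]
      constructor <;> nlinarith [hq'.1, hq'.2]
    have hmod : PySem.Int.mod t m = PySem.Int.mod (t - m) m := by
      have h1 := PySem.Int.floordiv_mul_add_mod t m
      have h2 := PySem.Int.floordiv_mul_add_mod (t - m) m
      rw [hdiv] at h1; nlinarith
    have hpos : 0 ≤ PySem.Int.floordiv (t - m) m := by nlinarith [hq'.1, hq'.2]
    rw [hdiv, hmod]
    have : (PySem.Int.floordiv (t - m) m + 1).toNat
        = (PySem.Int.floordiv (t - m) m).toNat + 1 := by omega
    simp [this, List.replicate_succ]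
  · rw [csqLoop, dif_neg (by omega), if_pos (by omega : (0:Int) < t - m)]
    by_cases he : t = 2 * m
    · have hdiv : PySem.Int.floordiv t m = 2 := by
        rw [PySem.Int.floordiv_eq_iff_of_pos hm]; constructor <;> omega
      have hmod : PySem.Int.mod t m = 0 := by
        have h1 := PySem.Int.floordiv_mul_add_mod t m
        rw [hdiv] at h1; nlinarith
      rw [hdiv, hmod]
      simp [List.replicate_succ]
      omega
    · have hdiv : PySem.Int.floordiv t m = 1 := by
        rw [PySem.Int.floordiv_eq_iff_of_pos hm]; constructor <;> omega
      have hmod : PySem.Int.mod t m = t - m := by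
        have h1 := PySem.Int.floordiv_mul_add_mod t m
        rw [hdiv] at h1; nlinarith
      rw [hdiv, hmod, if_pos (by omega : (0:Int) < t - m)]
      simp
termination_by t.toNat
decreasing_by omega

theorem compute_slice_quantities_py_spec : Claim_equal_compute_slice_quantities_py := by
  intro t m _
  unfold Spec_compute_slice_quantities_py compute_slice_quantities_py compute_slice_quantities_py_alt
  by_cases h : m ≤ 0 ∨ t ≤ m
  · simp [h]
  · push Not at h
    rw [if_neg (by omega), if_neg (by omega)]
    simpa using csqLoop_closed m t [] h.1 h.2
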